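-- pv_equiv track=rewrite | github.com/llmware-ai/llmware | llmware/util.py | check_if_alpha_string
-- ===== SOURCE A (Python) =====
-- def check_if_alpha_string(s):
--
--     alpha = -1
--     escape_on = -1
--
--     for x in range(0,len(s)):
--
--         if ord(s[x]) == 60:
--             escape_on = 1
--
--         # simple test - look for any alpha character outside of < >
--         if escape_on == -1:
--             if (64 < ord(s[x]) < 91) or (96 < ord(s[x]) < 123):
--                 alpha = 1
--                 break
--
--         if ord(s[x]) == 62:
--             escape_on = -1
--
--     return alpha
-- ===== SOURCE B (Python) =====
-- def check_if_alpha_string(s):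
--     # region-skipping: jump over <...> escaped regions via find instead of a per-char escape flag
--     rest = s
--     while rest:
--         c = rest[0]
--         if c == '<':
--             gt = rest.find('>')
--             if gt == -1:
--                 return -1
--             rest = rest[gt + 1:]
--         elif (64 < ord(c) < 91) or (96 < ord(c) < 123):
--             return 1
--         else:
--             rest = rest[1:]
--     return -1
-- ===== Notes on version B (the rewrite author's own statement) =====
-- stated objective: alternative
-- what changed: Replaced the char-by-char escape-flag state machine with region skipping: on '<' jump directly past the next '>' via str.find, otherwise test the character; no escape flag is maintained.
import Mathlib
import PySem

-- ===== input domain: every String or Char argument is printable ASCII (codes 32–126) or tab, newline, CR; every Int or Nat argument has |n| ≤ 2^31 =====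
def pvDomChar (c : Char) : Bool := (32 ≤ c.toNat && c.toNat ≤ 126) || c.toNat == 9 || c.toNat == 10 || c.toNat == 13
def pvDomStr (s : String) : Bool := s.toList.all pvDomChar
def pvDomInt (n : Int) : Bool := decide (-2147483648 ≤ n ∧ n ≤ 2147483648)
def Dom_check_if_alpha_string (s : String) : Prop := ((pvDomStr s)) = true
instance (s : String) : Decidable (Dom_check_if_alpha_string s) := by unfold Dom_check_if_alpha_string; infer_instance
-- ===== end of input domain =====

-- B replaces A's per-character escape-flag state machine by region skipping (on '<' jump past the next '>' at once); objective: alternative decomposition, same cost.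

-- ===== PORT A =====
-- the loop body of A: escape flag escOn ∈ {-1, 1} as in the Python; returns 1 at the
-- first alpha found outside an escaped region (the 'break'), -1 when the loop ends
def pvLoopA : List Char → Int → Int
  | [], _ => -1
  | c :: rest, escOn =>
    let escOn1 : Int := if c.toNat = 60 then 1 else escOn
    if escOn1 = -1 ∧ ((64 < c.toNat ∧ c.toNat < 91) ∨ (96 < c.toNat ∧ c.toNat < 123)) then 1
    else pvLoopA rest (if c.toNat = 62 then -1 else escOn1)

def check_if_alpha_string (s : String) : Int := pvLoopA s.toList (-1)

-- ===== PORT B =====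
-- the while loop of Source B over the remaining suffix; "gt = rest.find('>'); rest = rest[gt+1:]
-- (return -1 if gt == -1)" is exactly a match on dropWhile (· ≠ '>'): none left ⇒ -1,
-- else continue after the first '>'
def pvLoopB : List Char → Int
  | [] => -1
  | c :: rest =>
    if c = '<' then
      match h : rest.dropWhile (fun d => d ≠ '>') with
      | [] => -1
      | _ :: after => pvLoopB after
    else if (64 < c.toNat ∧ c.toNat < 91) ∨ (96 < c.toNat ∧ c.toNat < 123) then 1
    else pvLoopB rest
termination_by l => l.length
decreasing_by
  · have hle := List.length_dropWhile_le (p := fun d => d ≠ '>') (l := rest)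
    rw [h] at hle
    simp at hle ⊢
    omega
  · simp

def check_if_alpha_string_alt (s : String) : Int := pvLoopB s.toList

-- ===== PRECONDITION & SPEC =====
def Spec_check_if_alpha_string (s : String) (out : Int) : Prop := out = check_if_alpha_string_alt s
instance (s : String) (out : Int) : Decidable (Spec_check_if_alpha_string s out) := by unfold Spec_check_if_alpha_string; infer_instance

-- ===== CLAIM (what is proved, stated in full; the proofs are below) =====
def Claim_equal_check_if_alpha_string : Prop := ∀ (s : String), Dom_check_if_alpha_string s → Spec_check_if_alpha_string s (check_if_alpha_string s)

-- ===== LEMMAS AND PROOFS =====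

-- what B does to the rest of the string once inside an escaped region
def pvSkip (l : List Char) : Int :=
  match l.dropWhile (fun d => d ≠ '>') with
  | [] => -1
  | _ :: after => pvLoopB after

lemma pv_toNat_60 (c : Char) : c.toNat = 60 ↔ c = '<' := by
  constructor
  · intro h
    have hv : c.val.toNat = (('<' : Char).val).toNat := h
    exact Char.ext (UInt32.toNat_inj.mp hv)
  · rintro rfl; rfl

lemma pv_toNat_62 (c : Char) : c.toNat = 62 ↔ c = '>' := by
  constructor
  · intro h
    have hv : c.val.toNat = (('>' : Char).val).toNat := h
    exact Char.ext (UInt32.toNat_inj.mp hv)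
  · rintro rfl; rfl

lemma pvLoopB_nil : pvLoopB [] = -1 := by simp [pvLoopB]

lemma pvLoopB_lt (rest : List Char) : pvLoopB ('<' :: rest) = pvSkip rest := by
  rw [pvLoopB, if_pos rfl]
  split <;> rename_i h <;> simp only [ne_eq, decide_not] at h <;> simp [pvSkip, h]

lemma pvLoopB_cons (c : Char) (rest : List Char) (h : ¬ c = '<') :
    pvLoopB (c :: rest) =
      (if (64 < c.toNat ∧ c.toNat < 91) ∨ (96 < c.toNat ∧ c.toNat < 123) then 1
       else pvLoopB rest) := by
  rw [pvLoopB]; simp [h]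

lemma pvSkip_nil : pvSkip [] = -1 := by simp [pvSkip]

lemma pvSkip_gt (rest : List Char) : pvSkip ('>' :: rest) = pvLoopB rest := by
  simp [pvSkip]

lemma pvSkip_cons (c : Char) (rest : List Char) (h : ¬ c = '>') :
    pvSkip (c :: rest) = pvSkip rest := by
  simp only [pvSkip, List.dropWhile_cons]
  simp [h]

lemma pvLoopA_lt (rest : List Char) : pvLoopA ('<' :: rest) (-1) = pvLoopA rest 1 := by
  norm_num [pvLoopA, show ('<' : Char).toNat = 60 from rfl]

lemma pvLoopA_gt (rest : List Char) : pvLoopA ('>' :: rest) 1 = pvLoopA rest (-1) := by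
  norm_num [pvLoopA, show ('>' : Char).toNat = 62 from rfl]

-- the loops agree: A with escape off is B, A with escape on is B's region skip
lemma pv_loops_eq (n : Nat) :
    ∀ l : List Char, l.length ≤ n →
      pvLoopA l (-1) = pvLoopB l ∧ pvLoopA l 1 = pvSkip l := by
  induction n with
  | zero =>
    intro l hl
    have : l = [] := List.eq_nil_of_length_eq_zero (Nat.le_zero.mp hl)
    subst this
    exact ⟨by simp [pvLoopA, pvLoopB_nil], by simp [pvLoopA, pvSkip_nil]⟩
  | succ n ih =>
    intro l hl
    cases l with
    | nil => exact ⟨by simp [pvLoopA, pvLoopB_nil], by simp [pvLoopA, pvSkip_nil]⟩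
    | cons c rest =>
      have hrest : rest.length ≤ n := by simpa using Nat.succ_le_succ_iff.mp hl
      obtain ⟨ih1, ih2⟩ := ih rest hrest
      constructor
      · -- escape off
        by_cases hlt : c = '<'
        · subst hlt
          rw [pvLoopA_lt, pvLoopB_lt]
          exact ih2
        · have hlt' : ¬ c.toNat = 60 := fun h => hlt ((pv_toNat_60 c).mp h)
          rw [pvLoopB_cons c rest hlt]
          by_cases halpha : (64 < c.toNat ∧ c.toNat < 91) ∨ (96 < c.toNat ∧ c.toNat < 123)
          · simp [pvLoopA, hlt', halpha]
          · by_cases hgt : c.toNat = 62 <;> simp [pvLoopA, hlt', hgt, halpha, ih1]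
      · -- escape on: the alpha test is dead until a '>' resets the flag
        by_cases hgt : c = '>'
        · subst hgt
          rw [pvLoopA_gt, pvSkip_gt]
          exact ih1
        · have hgt' : ¬ c.toNat = 62 := fun h => hgt ((pv_toNat_62 c).mp h)
          rw [pvSkip_cons c rest hgt]
          simp [pvLoopA, hgt', ih2]

-- ===== VERDICT (by name: the statement is the Claim_ definition above) =====
theorem check_if_alpha_string_spec : Claim_equal_check_if_alpha_string := by
  intro s _
  unfold Spec_check_if_alpha_string check_if_alpha_string check_if_alpha_string_alt
  exact (pv_loops_eq s.toList.length s.toList (le_refl _)).1
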